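-- pv_equiv track=rewrite | github.com/SeetharamanM/Vaigai-NBR | app_overlap_gap.py | coverage_to_ranges
-- ===== SOURCE A (Python) =====
-- def coverage_to_ranges(chainage_index, coverage, resolution, min_count=0, max_count=None):
--     """Merge coverage array into contiguous ranges where count in [min_count, max_count] (inclusive)."""
--     if max_count is None:
--         max_count = max(coverage) if coverage else 0
--     ranges = []
--     in_range = False
--     start_m = None
--     for i, m in enumerate(chainage_index):
--         c = coverage[i] if i < len(coverage) else 0
--         ok = min_count <= c <= max_count
--         if ok and not in_range:
--             start_m = m
--             in_range = True
--         elif not ok and in_range: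
--             ranges.append((start_m, m))  # end exclusive at m
--             in_range = False
--     if in_range:
--         end_m = chainage_index[-1] + resolution if chainage_index else 0
--         ranges.append((start_m, end_m))
--     return ranges
-- ===== SOURCE B (Python) =====
-- def coverage_to_ranges(chainage_index, coverage, resolution, min_count=0, max_count=None):
--     """Boundary detection: independently find run starts and run ends, then pair them."""
--     if max_count is None:
--         max_count = max(coverage) if coverage else 0
--     n = len(chainage_index)
--     cov = coverage[:n] + [0] * (n - len(coverage))
--     ok = [min_count <= c <= max_count for c in cov]
--     nxt = chainage_index[1:] + ([chainage_index[-1] + resolution] if chainage_index else [])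
--     starts = [m for m, o, prev in zip(chainage_index, ok, [False] + ok) if o and not prev]
--     ends = [e for e, o, nex in zip(nxt, ok, ok[1:] + [False]) if o and not nex]
--     return list(zip(starts, ends))
-- ===== Notes on version B (the rewrite author's own statement) =====
-- stated objective: alternative
-- what changed: Replaces A's stateful single pass (in_range/start_m flags) by stateless boundary detection: four staged comprehensions compute the ok flags, then the run-start coordinates (ok here, not ok before) and the run-end coordinates (ok here, not ok after) independently against shifted copies of the flag list, and the result is zip(starts, ends); no scan state is maintained.
import Mathlib
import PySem

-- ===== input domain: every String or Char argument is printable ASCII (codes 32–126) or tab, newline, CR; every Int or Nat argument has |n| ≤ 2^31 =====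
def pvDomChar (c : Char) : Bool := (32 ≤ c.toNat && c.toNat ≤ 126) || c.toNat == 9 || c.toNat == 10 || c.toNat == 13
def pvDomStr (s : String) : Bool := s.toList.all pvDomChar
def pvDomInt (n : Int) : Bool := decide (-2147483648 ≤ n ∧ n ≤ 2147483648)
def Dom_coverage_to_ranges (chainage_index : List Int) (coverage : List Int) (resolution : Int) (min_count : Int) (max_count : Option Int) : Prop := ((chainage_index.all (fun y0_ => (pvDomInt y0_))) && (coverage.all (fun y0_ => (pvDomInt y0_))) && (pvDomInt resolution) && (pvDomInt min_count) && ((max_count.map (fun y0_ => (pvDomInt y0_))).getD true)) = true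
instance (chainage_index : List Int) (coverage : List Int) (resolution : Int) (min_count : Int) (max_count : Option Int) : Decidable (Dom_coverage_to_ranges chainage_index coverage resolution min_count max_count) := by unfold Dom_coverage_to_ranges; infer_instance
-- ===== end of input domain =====

-- B replaces A's stateful scan by stateless boundary detection (starts and ends computed
-- independently against shifted flag lists, then zipped); alternative decomposition, same cost.

-- ===== PORT A =====
-- A's loop body: state (ranges, in_range, start_m), element (i, m) from enumerate
def ctrStep (cov : List Int) (mn mc : Int)
    (st : List (Int × Int) × Bool × Option Int) (im : Int × Int) :
    List (Int × Int) × Bool × Option Int :=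
  let c := if im.1 < (cov.length : Int) then PySem.List.pyGetD cov im.1 0 else 0
  if (mn ≤ c ∧ c ≤ mc) ∧ ¬ st.2.1 then (st.1, true, some im.2)
  else if ¬ (mn ≤ c ∧ c ≤ mc) ∧ st.2.1 then (st.1 ++ [(st.2.2.getD 0, im.2)], false, st.2.2)
  else st

def coverage_to_ranges (chainage_index : List Int) (coverage : List Int) (resolution : Int) (min_count : Int) (max_count : Option Int) : List (Int × Int) :=
  let mc := match max_count with
    | some v => v
    | none => if coverage ≠ [] then (PySem.List.max? coverage id).getD 0 else 0
  let st := (PySem.List.enumerate chainage_index 0).foldl (ctrStep coverage min_count mc) ([], false, none)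
  if st.2.1 then
    st.1 ++ [(st.2.2.getD 0, if chainage_index ≠ [] then PySem.List.pyGetD chainage_index (-1) 0 + resolution else 0)]
  else st.1

-- ===== PORT B =====
-- transliteration of Source B: ok flags; starts/ends by filtering against shifted flag lists; zip
def coverage_to_ranges_alt (chainage_index : List Int) (coverage : List Int) (resolution : Int) (min_count : Int) (max_count : Option Int) : List (Int × Int) :=
  let mc := match max_count with
    | some v => v
    | none => if coverage ≠ [] then (PySem.List.max? coverage id).getD 0 else 0
  let n := chainage_index.length
  let cov := PySem.List.slice coverage none (some (n : Int)) ++ List.replicate (n - coverage.length) 0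
  let ok := cov.map (fun c => decide (min_count ≤ c ∧ c ≤ mc))
  let nxt := PySem.List.slice chainage_index (some 1) none
      ++ (if chainage_index ≠ [] then [PySem.List.pyGetD chainage_index (-1) 0 + resolution] else [])
  let starts := ((chainage_index.zip (ok.zip (false :: ok))).filter
      (fun t => t.2.1 && !t.2.2)).map Prod.fst
  let ends := ((nxt.zip (ok.zip (PySem.List.slice ok (some 1) none ++ [false]))).filter
      (fun t => t.2.1 && !t.2.2)).map Prod.fst
  starts.zip ends

-- ===== PRECONDITION & SPEC =====
def Spec_coverage_to_ranges (chainage_index : List Int) (coverage : List Int) (resolution : Int) (min_count : Int) (max_count : Option Int) (out : List (Int × Int)) : Prop := out = coverage_to_ranges_alt chainage_index coverage resolution min_count max_count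
instance (chainage_index : List Int) (coverage : List Int) (resolution : Int) (min_count : Int) (max_count : Option Int) (out : List (Int × Int)) : Decidable (Spec_coverage_to_ranges chainage_index coverage resolution min_count max_count out) := by unfold Spec_coverage_to_ranges; infer_instance

-- ===== CLAIM =====
def Claim_equal_coverage_to_ranges : Prop := ∀ (chainage_index : List Int) (coverage : List Int) (resolution : Int) (min_count : Int) (max_count : Option Int), Dom_coverage_to_ranges chainage_index coverage resolution min_count max_count → Spec_coverage_to_ranges chainage_index coverage resolution min_count max_count (coverage_to_ranges chainage_index coverage resolution min_count max_count)

-- ===== LEMMAS AND PROOFS =====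

-- A's step, re-expressed on a precomputed (coordinate, ok) pair
def ctrStepP (st : List (Int × Int) × Bool × Option Int) (p : Int × Bool) :
    List (Int × Int) × Bool × Option Int :=
  if p.2 ∧ ¬ st.2.1 then (st.1, true, some p.1)
  else if ¬ p.2 ∧ st.2.1 then (st.1 ++ [(st.2.2.getD 0, p.1)], false, st.2.2)
  else st

-- zip of chainage with coverage padded by zeros, ok precomputed
def ctrPair : List Int → List Int → Int → Int → List (Int × Bool)
  | [], _, _, _ => []
  | m :: ch, [], mn, mc => (m, decide (mn ≤ (0:Int) ∧ (0:Int) ≤ mc)) :: ctrPair ch [] mn mc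
  | m :: ch, c :: d, mn, mc => (m, decide (mn ≤ c ∧ c ≤ mc)) :: ctrPair ch d mn mc

-- A's post-loop finalization
def ctrFin (st : List (Int × Int) × Bool × Option Int) (sent : Int) : List (Int × Int) :=
  if st.2.1 then st.1 ++ [(st.2.2.getD 0, sent)] else st.1

-- run-start coordinates, given the previous element's flag
def ctrS : Bool → List (Int × Bool) → List Int
  | _, [] => []
  | prev, (m, b) :: r => (if b && !prev then [m] else []) ++ ctrS b r

-- run-end coordinates, given the previous element's flag (each run ends at the coordinate
-- of the first element after it, or at the sentinel)
def ctrE : Bool → List (Int × Bool) → Int → List Int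
  | prev, [], sent => if prev then [sent] else []
  | prev, (m, b) :: r, sent => (if prev && !b then [m] else []) ++ ctrE b r sent

lemma ctrStep_eq_stepP (cov : List Int) (mn mc : Int) (st : List (Int × Int) × Bool × Option Int)
    (s : Nat) (m : Int) :
    ctrStep cov mn mc st ((s : Int), m)
      = ctrStepP st (m, decide (mn ≤ (if s < cov.length then cov.getD s 0 else 0)
                              ∧ (if s < cov.length then cov.getD s 0 else 0) ≤ mc)) := by
  simp only [ctrStep, ctrStepP, PySem.List.pyGetD_natCast]
  have hc : (if (s : Int) < (cov.length : Int) then cov.getD s 0 else 0)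
      = (if s < cov.length then cov.getD s 0 else 0) := by
    split_ifs with h1 h2 h2 <;> first | rfl | (exfalso; omega)
  rw [hc]
  by_cases hok : mn ≤ (if s < cov.length then cov.getD s 0 else 0)
      ∧ (if s < cov.length then cov.getD s 0 else 0) ≤ mc
  · simp
  · simp

lemma foldA_eq_foldP (mn mc : Int) (cov : List Int) (ch : List Int) :
    ∀ (s : Nat) (st : List (Int × Int) × Bool × Option Int),
    (PySem.List.enumerate ch (s : Int)).foldl (ctrStep cov mn mc) st
      = (ctrPair ch (cov.drop s) mn mc).foldl ctrStepP st := by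
  induction ch with
  | nil => intro s st; simp [PySem.List.enumerate_nil, ctrPair]
  | cons m ch ih =>
    intro s st
    rw [PySem.List.enumerate_cons]
    have hcast : (s : Int) + 1 = ((s + 1 : Nat) : Int) := by push_cast; ring
    cases h : cov.drop s with
    | nil =>
      have hlen : cov.length ≤ s := by
        have := List.drop_eq_nil_iff.mp h; omega
      have h1 : cov.drop (s + 1) = [] := by
        apply List.drop_eq_nil_iff.mpr; omega
      simp only [List.foldl_cons, ctrPair, hcast, ih (s+1) _, h1]
      rw [ctrStep_eq_stepP]
      have : ¬ s < cov.length := by omega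
      simp [this]
    | cons c d =>
      have hs : s < cov.length := by
        by_contra hn
        rw [List.drop_eq_nil_iff.mpr (by omega)] at h; exact absurd h (by simp)
      have h0 : cov[s]? = some c := by
        have := congrArg (fun l => l[0]?) h
        simpa using this
      have hg : cov[s] = c := by
        have h2 : cov[s]? = some cov[s] := List.getElem?_eq_getElem hs
        rw [h0] at h2; exact (Option.some.inj h2).symm
      have h1 : cov.drop (s + 1) = d := by
        have := congrArg List.tail h
        simpa [List.tail_drop] using this
      simp only [List.foldl_cons, ctrPair, hcast, ih (s+1) _, h1]
      rw [ctrStep_eq_stepP]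
      simp [hs, hg]

lemma ctrPair_eq_zip (mn mc : Int) (ch : List Int) :
    ∀ cov : List Int,
    ctrPair ch cov mn mc
      = ((ch.zip (PySem.List.slice cov none (some (ch.length : Int))
            ++ List.replicate (ch.length - cov.length) 0)).map
          (fun p => (p.1, decide (mn ≤ p.2 ∧ p.2 ≤ mc)))) := by
  induction ch with
  | nil => intro cov; simp [ctrPair]
  | cons m ch ih =>
    intro cov
    cases cov with
    | nil =>
      simp only [ctrPair, List.length_cons]
      rw [PySem.List.slice_to_natCast]
      simp only [List.take_nil, List.nil_append, List.length_nil]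
      rw [show ch.length + 1 - 0 = ch.length + 1 by omega, List.replicate_succ]
      simp only [List.zip_cons_cons, List.map_cons]
      rw [ih []]
      rw [PySem.List.slice_to_natCast]
      simp
    | cons c cov =>
      simp only [ctrPair, List.length_cons]
      rw [PySem.List.slice_to_natCast]
      simp only [List.take_succ_cons]
      rw [show ch.length + 1 - (cov.length + 1) = ch.length - cov.length by omega]
      simp only [List.cons_append, List.zip_cons_cons, List.map_cons]
      rw [ih cov, PySem.List.slice_to_natCast]

-- A's fold + finalization produce exactly zip (starts) (ends)
lemma foldP_SE (sent : Int) (pts : List (Int × Bool)) :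
    ∀ (acc : List (Int × Int)) (sm : Option Int),
      (ctrFin (pts.foldl ctrStepP (acc, false, sm)) sent
          = acc ++ (ctrS false pts).zip (ctrE false pts sent))
      ∧ (∀ s : Int, ctrFin (pts.foldl ctrStepP (acc, true, some s)) sent
          = acc ++ ((s :: ctrS true pts).zip (ctrE true pts sent))) := by
  induction pts with
  | nil =>
    intro acc sm
    constructor
    · simp [ctrFin, ctrS, ctrE]
    · intro s; simp [ctrFin, ctrS, ctrE]
  | cons p rest ih =>
    intro acc sm
    obtain ⟨m, b⟩ := p
    cases b with
    | true =>
      constructor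
      · simp only [List.foldl_cons, ctrStepP]
        have := (ih acc sm).2 m
        simpa [ctrS, ctrE] using this
      · intro s
        simp only [List.foldl_cons, ctrStepP]
        have := (ih acc (some s)).2 s
        simpa [ctrS, ctrE] using this
    | false =>
      constructor
      · simp only [List.foldl_cons, ctrStepP]
        have := (ih acc sm).1
        simpa [ctrS, ctrE] using this
      · intro s
        simp only [List.foldl_cons, ctrStepP]
        have := (ih (acc ++ [(s, m)]) (some s)).1
        simpa [ctrS, ctrE] using this

-- B's starts comprehension computes ctrS
lemma starts_eq_ctrS (pts : List (Int × Bool)) :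
    ∀ prev : Bool,
    (((pts.map Prod.fst).zip ((pts.map Prod.snd).zip (prev :: pts.map Prod.snd))).filter
        (fun t => t.2.1 && !t.2.2)).map Prod.fst = ctrS prev pts := by
  induction pts with
  | nil => intro prev; simp [ctrS]
  | cons p rest ih =>
    intro prev
    obtain ⟨m, b⟩ := p
    simp only [List.map_cons, List.zip_cons_cons, List.filter_cons, ctrS]
    by_cases h : b && !prev
    · simp [h, ih b]
    · simp [h, ih b]

-- B's ends comprehension computes ctrE
lemma ends_eq_ctrE (pts : List (Int × Bool)) :
    ∀ (b : Bool) (sent : Int),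
    ((((pts.map Prod.fst) ++ [sent]).zip ((b :: pts.map Prod.snd).zip
        ((pts.map Prod.snd) ++ [false]))).filter (fun t => t.2.1 && !t.2.2)).map Prod.fst
      = ctrE b pts sent := by
  induction pts with
  | nil =>
    intro b sent
    cases b <;> simp [ctrE]
  | cons p rest ih =>
    intro b sent
    obtain ⟨m2, b2⟩ := p
    simp only [List.map_cons, List.cons_append, List.zip_cons_cons, List.filter_cons, ctrE]
    by_cases h : b && !b2
    · simp [h, ih b2]
    · simp [h, ih b2]

-- ===== VERDICT =====
theorem coverage_to_ranges_spec : Claim_equal_coverage_to_ranges := by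
  unfold Claim_equal_coverage_to_ranges
  intro ch cov res mn mcOpt _
  unfold Spec_coverage_to_ranges coverage_to_ranges coverage_to_ranges_alt
  set mc := match mcOpt with
    | some v => v
    | none => if cov ≠ [] then (PySem.List.max? cov id).getD 0 else 0 with hmc
  set sent := if ch ≠ [] then PySem.List.pyGetD ch (-1) 0 + res else 0 with hsent
  -- common pieces
  set cov' := PySem.List.slice cov none (some (ch.length : Int))
      ++ List.replicate (ch.length - cov.length) 0 with hcov'
  have hcovlen : cov'.length = ch.length := by
    rw [hcov', PySem.List.slice_to_natCast]
    simp only [List.length_append, List.length_take, List.length_replicate]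
    omega
  set pts := (ch.zip cov').map (fun p => (p.1, decide (mn ≤ p.2 ∧ p.2 ≤ mc))) with hpts
  have hfst : pts.map Prod.fst = ch := by
    rw [hpts]
    simp only [List.map_map]
    simpa using List.map_fst_zip (show ch.length ≤ cov'.length by omega)
  have hsnd : pts.map Prod.snd = cov'.map (fun c => decide (mn ≤ c ∧ c ≤ mc)) := by
    rw [hpts]
    simp only [List.map_map]
    have h := List.map_snd_zip (show cov'.length ≤ ch.length by omega)
    calc (ch.zip cov').map (Prod.snd ∘ (fun p : Int × Int => (p.1, decide (mn ≤ p.2 ∧ p.2 ≤ mc))))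
        = ((ch.zip cov').map Prod.snd).map (fun c => decide (mn ≤ c ∧ c ≤ mc)) := by
          simp [List.map_map]
      _ = cov'.map (fun c => decide (mn ≤ c ∧ c ≤ mc)) := by rw [h]
  -- A's side as fold over pts
  have hfold := foldA_eq_foldP mn mc cov ch 0 ([], false, none)
  simp only [Nat.cast_zero, List.drop_zero] at hfold
  have hfin := (foldP_SE sent (ctrPair ch cov mn mc) [] none).1
  show ctrFin ((PySem.List.enumerate ch 0).foldl (ctrStep cov mn mc) ([], false, none)) sent = _
  rw [hfold, hfin, ctrPair_eq_zip, ← hcov', ← hpts]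
  simp only [List.nil_append]
  -- B's side: rewrite ok list and nxt list in terms of pts
  rw [PySem.List.slice_from_one]
  have hok : cov'.map (fun c => decide (mn ≤ c ∧ c ≤ mc)) = pts.map Prod.snd := hsnd.symm
  rw [hok]
  -- starts
  have hstarts : ((ch.zip ((pts.map Prod.snd).zip (false :: pts.map Prod.snd))).filter
      (fun t => t.2.1 && !t.2.2)).map Prod.fst = ctrS false pts := by
    conv_lhs => rw [← hfst]
    exact starts_eq_ctrS pts false
  rw [hstarts]
  -- ends: rewrite via pts decomposition
  simp only [PySem.List.slice_from_one]
  cases hpts2 : pts with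
  | nil =>
    simp [ctrS]
  | cons p0 rest =>
    obtain ⟨mm, b0⟩ := p0
    have hch : ch = mm :: rest.map Prod.fst := by
      have h := hfst; rw [hpts2] at h; simpa using h.symm
    have hsent2 : (if ch ≠ [] then [PySem.List.pyGetD ch (-1) 0 + res] else []) = [sent] := by
      rw [hsent]; simp [hch]
    rw [hsent2, hch]
    simp only [List.tail_cons, List.map_cons]
    simp [ends_eq_ctrE rest b0 sent, ctrE]
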